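-- pv_equiv track=rewrite | github.com/petersn/erasure-codes | show_version.py | rs_mat
-- ===== SOURCE A (Python) =====
-- def poly_rem(p1: int, p2: int) -> bool:
--     while p2.bit_length() <= p1.bit_length():
--         p1 ^= p2 << (p1.bit_length() - p2.bit_length())
--     return p1
--
-- def poly_mul(a: int, b: int) -> int:
--     p = 0
--     for i in range(b.bit_length()):
--         if b & (1 << i):
--             p ^= a << i
--     return p
--
-- def gf_mul(poly: int, a: int, b: int) -> int:
--     return poly_rem(poly_mul(a, b), poly)
--
-- def gf_inv(poly: int, a: int) -> int:
--     r = 1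
--     for _ in range(poly.bit_length() - 2):
--         a = gf_mul(poly, a, a)
--         r = gf_mul(poly, r, a)
--     return r
--
-- def rs_mat(poly: int, input_x: list[int], output_x: list[int]):
--     table = [[1] * len(output_x) for _ in range(len(input_x))]
--     for i in range(len(input_x)):
--         for j in range(len(output_x)):
--             for p in range(len(input_x)):
--                 if p != i:
--                     table[i][j] = gf_mul(poly, table[i][j], gf_mul(
--                         poly,
--                         output_x[j] ^ input_x[p],
--                         gf_inv(poly, input_x[i] ^ input_x[p]),
--                     ))
--     return table
-- ===== SOURCE B (Python) =====
-- def poly_rem(p1: int, p2: int) -> bool: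
--     while p2.bit_length() <= p1.bit_length():
--         p1 ^= p2 << (p1.bit_length() - p2.bit_length())
--     return p1
--
-- def poly_mul(a: int, b: int) -> int:
--     p = 0
--     for i in range(b.bit_length()):
--         if b & (1 << i):
--             p ^= a << i
--     return p
--
-- def gf_mul(poly: int, a: int, b: int) -> int:
--     return poly_rem(poly_mul(a, b), poly)
--
-- def gf_inv(poly: int, a: int) -> int:
--     r = 1
--     for _ in range(poly.bit_length() - 2):
--         a = gf_mul(poly, a, a)
--         r = gf_mul(poly, r, a)
--     return r
--
-- def rs_mat(poly: int, input_x: list[int], output_x: list[int]):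
--     # Precompute, once per row i, the pairs (x_p, (x_i ^ x_p)^-1) for p != i;
--     # each cell is then a single product over those pairs (no gf_inv in the inner loop).
--     if not output_x:
--         return [[] for _ in input_x]
--     table = []
--     for i, xi in enumerate(input_x):
--         pairs = [(xp, gf_inv(poly, xi ^ xp))
--                  for p, xp in enumerate(input_x) if p != i]
--         row = []
--         for y in output_x:
--             v = 1
--             for xp, inv in pairs:
--                 v = gf_mul(poly, v, gf_mul(poly, y ^ xp, inv))
--             row.append(v)
--         table.append(row)
--     return table
-- ===== Notes on version B (the rewrite author's own statement) =====
-- stated objective: faster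
-- what changed: B enumerates rows and precomputes, once per row i, the list of pairs (x_p, gf_inv(poly, x_i^x_p)) for p != i, so each of the n*m cells is a plain product over those pairs instead of recomputing each O(k)-gf_mul inverse inside the innermost loop.
import Mathlib
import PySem

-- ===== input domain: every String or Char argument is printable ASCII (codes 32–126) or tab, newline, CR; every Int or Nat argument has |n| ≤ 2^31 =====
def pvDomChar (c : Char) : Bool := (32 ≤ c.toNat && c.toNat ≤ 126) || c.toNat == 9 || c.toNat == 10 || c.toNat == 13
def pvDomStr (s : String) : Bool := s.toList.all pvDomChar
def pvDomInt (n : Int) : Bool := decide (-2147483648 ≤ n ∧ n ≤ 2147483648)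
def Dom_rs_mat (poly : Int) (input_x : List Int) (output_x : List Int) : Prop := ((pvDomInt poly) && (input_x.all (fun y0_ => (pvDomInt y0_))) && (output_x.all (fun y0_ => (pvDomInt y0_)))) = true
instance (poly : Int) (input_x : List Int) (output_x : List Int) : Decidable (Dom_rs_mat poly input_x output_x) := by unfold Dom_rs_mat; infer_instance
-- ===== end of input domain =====

-- B hoists the per-pair GF inverses out of the j-loop (computed once per row), so gf_inv runs once per pair instead of once per cell; equal tables.


-- ===== PORT A =====
-- A and B share the module's GF(2^k) helpers (poly_rem, poly_mul, gf_mul, gf_inv), ported once here.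
-- poly_rem's while-loop is given fuel bitLength p1 + bitLength p2 + 2; every TERMINATING execution of
-- the Python loop finishes within that many iterations, so the port is exact wherever the Python returns
-- (the Python loop can run forever, e.g. p2 = 0; there it returns nothing and nothing is claimed).
def polyRemGo : Nat → Int → Int → Int
  | 0, p1, _ => p1
  | fuel + 1, p1, p2 =>
      if PySem.Int.bitLength p2 ≤ PySem.Int.bitLength p1 then
        polyRemGo fuel (PySem.Int.bxor p1 (p2 <<< (PySem.Int.bitLength p1 - PySem.Int.bitLength p2))) p2
      else p1

def polyRem (p1 p2 : Int) : Int := polyRemGo (PySem.Int.bitLength p1 + PySem.Int.bitLength p2 + 2) p1 p2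

def polyMul (a b : Int) : Int :=
  (List.range (PySem.Int.bitLength b)).foldl
    (fun p i => if PySem.Int.band b ((1 : Int) <<< i) ≠ 0 then PySem.Int.bxor p (a <<< i) else p) 0

def gfMul (poly a b : Int) : Int := polyRem (polyMul a b) poly

def gfInv (poly a : Int) : Int :=
  ((List.range (PySem.Int.bitLength poly - 2)).foldl
    (fun (s : Int × Int) _ =>
      let a' := gfMul poly s.1 s.1
      (a', gfMul poly s.2 a')) (a, 1)).2

def rs_mat (poly : Int) (input_x : List Int) (output_x : List Int) : List (List Int) :=
  (PySem.List.pyRange 0 (input_x.length : Int) 1).map (fun i =>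
    (PySem.List.pyRange 0 (output_x.length : Int) 1).map (fun j =>
      (PySem.List.pyRange 0 (input_x.length : Int) 1).foldl (fun acc p =>
        if p ≠ i then
          gfMul poly acc (gfMul poly
            (PySem.Int.bxor (PySem.List.pyGetD output_x j 0) (PySem.List.pyGetD input_x p 0))
            (gfInv poly (PySem.Int.bxor (PySem.List.pyGetD input_x i 0) (PySem.List.pyGetD input_x p 0))))
        else acc) 1))

-- ===== PORT B =====
def rs_mat_alt (poly : Int) (input_x : List Int) (output_x : List Int) : List (List Int) :=
  if output_x = [] then input_x.map (fun _ => []) else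
  (PySem.List.enumerate input_x 0).map (fun q =>
    let pairs := ((PySem.List.enumerate input_x 0).filter (fun r => r.1 ≠ q.1)).map
      (fun r => (r.2, gfInv poly (PySem.Int.bxor q.2 r.2)))
    output_x.map (fun y =>
      pairs.foldl (fun v pr => gfMul poly v (gfMul poly (PySem.Int.bxor y pr.1) pr.2)) 1))

-- ===== PRECONDITION & SPEC =====
def Spec_rs_mat (poly : Int) (input_x : List Int) (output_x : List Int) (out : List (List Int)) : Prop := out = rs_mat_alt poly input_x output_x
instance (poly : Int) (input_x : List Int) (output_x : List Int) (out : List (List Int)) : Decidable (Spec_rs_mat poly input_x output_x out) := by unfold Spec_rs_mat; infer_instance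

-- ===== CLAIM (what is proved, stated in full; the proofs are below) =====
def Claim_equal_rs_mat : Prop := ∀ (poly : Int) (input_x : List Int) (output_x : List Int), Dom_rs_mat poly input_x output_x → Spec_rs_mat poly input_x output_x (rs_mat poly input_x output_x)

-- ===== LEMMAS AND PROOFS =====
-- '[f(output_x[j]) for j in range(len(output_x))]' is 'output_x.map f'
theorem map_getD_eq {α : Type} (xs : List Int) (f : Int → α) :
    (PySem.List.pyRange 0 (xs.length : Int) 1).map (fun j => f (PySem.List.pyGetD xs j 0)) = xs.map f := by
  rw [show (fun j => f (PySem.List.pyGetD xs j 0)) = f ∘ (fun j => PySem.List.pyGetD xs j 0) from rfl,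
    ← List.map_map, PySem.List.map_pyGetD_pyRange_zero']

theorem rs_mat_eq_alt (poly : Int) (input_x output_x : List Int) :
    rs_mat poly input_x output_x = rs_mat_alt poly input_x output_x := by
  unfold rs_mat rs_mat_alt
  by_cases houtput : output_x = []
  · subst houtput
    simp [PySem.List.pyRange_one_eq_nil, List.map_const', PySem.List.length_pyRange_one]
  rw [if_neg houtput, PySem.List.enumerate_eq_map_pyRange (d := 0)]
  simp only [PySem.List.len_eq, List.filter_map, List.map_map, List.foldl_map, List.foldl_filter,
    Function.comp]
  refine List.map_congr_left (fun i _ => ?_)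
  simp only [Function.comp_apply]
  rw [← map_getD_eq output_x]
  simp only [decide_eq_true_eq]

-- ===== VERDICT (by name: the statement is the Claim_ definition above) =====
theorem rs_mat_spec : Claim_equal_rs_mat := by
  intro poly input_x output_x _
  unfold Spec_rs_mat
  exact rs_mat_eq_alt poly input_x output_x
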